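-- pv_equiv track=rewrite | github.com/worladev/cwb-bin-sessions | cwb-bin-session17.py | count_faulty_servers
-- ===== SOURCE A (Python) =====
-- def count_faulty_servers(classifications):
--
--     segregate = dict() #dictionary to hold performance of each server
--     count_faulty_servers = 0 #tracker to keep count of faulty servers
--
--     #loop to assign performance value to each server
--     for item in range(1, len(classifications), 2):
--         if classifications[item] not in segregate:
--             segregate[classifications[item]] = [classifications[item-1]]
--         else:
--             segregate[classifications[item]] += [classifications[item-1]]
--
--     #loop to check for faulty servers
--     for value in segregate.values():
--         if "H" in value and "M" in value and "L" in value: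
--             count_faulty_servers += 1 #increment faulty server value by 1
--
--     return count_faulty_servers #return number of faulty servers
-- ===== SOURCE B (Python) =====
-- def count_faulty_servers(classifications):
--     # Single pass: per-server bitmask of classification letters seen; count a
--     # server exactly once, at the moment its mask first covers H, M and L.
--     masks = {}
--     count = 0
--     for item in range(1, len(classifications), 2):
--         key = classifications[item]
--         letter = classifications[item - 1]
--         bit = 1 if letter == "H" else 2 if letter == "M" else 4 if letter == "L" else 0
--         old = masks.get(key, 0)
--         new = old | bit
--         masks[key] = new
--         if new == 7 and old != 7:
--             count += 1
--     return count
-- ===== Notes on version B (the rewrite author's own statement) =====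
-- stated objective: alternative
-- what changed: Replaces A's two-phase group-then-scan (build a dict of per-server lists of letters, then a second pass testing each list for H, M and L) by a single pass keeping only a per-server bitmask of letters seen, incrementing the counter once when a server's mask first covers all three.
import Mathlib
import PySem

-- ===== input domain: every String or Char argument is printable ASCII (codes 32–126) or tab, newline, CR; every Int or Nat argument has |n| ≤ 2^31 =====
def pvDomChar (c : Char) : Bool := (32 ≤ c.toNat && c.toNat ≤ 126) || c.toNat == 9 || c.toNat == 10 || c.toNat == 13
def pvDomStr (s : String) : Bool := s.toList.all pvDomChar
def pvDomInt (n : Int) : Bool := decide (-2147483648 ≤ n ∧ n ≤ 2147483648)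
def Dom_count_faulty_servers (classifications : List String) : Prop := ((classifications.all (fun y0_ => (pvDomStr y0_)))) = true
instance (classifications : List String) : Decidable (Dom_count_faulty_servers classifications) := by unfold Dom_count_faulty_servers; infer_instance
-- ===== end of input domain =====

-- B replaces A's group-into-lists-then-scan by one pass over a per-server letter bitmask (alternative decomposition; same result).

-- ===== PORT A =====
-- A's loop body; indices from range(1, len, 2) are always in range, so pyGetD "" is exact
-- (and in the 'else' branch the key is present, so getD [] is exactly Python's d[k]).
def pvStepA (classifications : List String) (d : PySem.Dict String (List String)) (item : Int) :
    PySem.Dict String (List String) :=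
  let k := PySem.List.pyGetD classifications item ""
  let v := PySem.List.pyGetD classifications (item - 1) ""
  if d.contains k = false then d.insert k [v] else d.insert k (d.getD k [] ++ [v])

def count_faulty_servers (classifications : List String) : Int :=
  let segregate := (PySem.List.pyRange 1 (classifications.length : Int) 2).foldl
    (pvStepA classifications) PySem.Dict.empty
  segregate.values.foldl
    (fun c value => if "H" ∈ value ∧ "M" ∈ value ∧ "L" ∈ value then c + 1 else c) 0

-- ===== PORT B =====
def pvBit (letter : String) : Int :=
  if letter = "H" then 1 else if letter = "M" then 2 else if letter = "L" then 4 else 0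

def pvStepB (classifications : List String) (st : PySem.Dict String Int × Int) (item : Int) :
    PySem.Dict String Int × Int :=
  let key := PySem.List.pyGetD classifications item ""
  let letter := PySem.List.pyGetD classifications (item - 1) ""
  let old := st.1.getD key 0
  let new := PySem.Int.bor old (pvBit letter)
  (st.1.insert key new, if new = 7 ∧ ¬ old = 7 then st.2 + 1 else st.2)

def count_faulty_servers_alt (classifications : List String) : Int :=
  ((PySem.List.pyRange 1 (classifications.length : Int) 2).foldl
    (pvStepB classifications) (PySem.Dict.empty, 0)).2

-- ===== PRECONDITION & SPEC =====
def Spec_count_faulty_servers (classifications : List String) (out : Int) : Prop := out = count_faulty_servers_alt classifications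
instance (classifications : List String) (out : Int) : Decidable (Spec_count_faulty_servers classifications out) := by unfold Spec_count_faulty_servers; infer_instance

-- ===== CLAIM (what is proved, stated in full; the proofs are below) =====
def Claim_equal_count_faulty_servers : Prop := ∀ (classifications : List String), Dom_count_faulty_servers classifications → Spec_count_faulty_servers classifications (count_faulty_servers classifications)

-- ===== LEMMAS AND PROOFS =====

-- the bitmask of a list of letters
def pvMask (v : List String) : Int :=
  (if "H" ∈ v then 1 else 0) + (if "M" ∈ v then 2 else 0) + (if "L" ∈ v then 4 else 0)

-- A's second loop, as a function of the dict
def pvAF (d : PySem.Dict String (List String)) : Int :=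
  d.values.foldl
    (fun c value => if "H" ∈ value ∧ "M" ∈ value ∧ "L" ∈ value then c + 1 else c) 0

theorem pvMask_append (v : List String) (x : String) :
    PySem.Int.bor (pvMask v) (pvBit x) = pvMask (v ++ [x]) := by
  simp only [pvMask, pvBit, List.mem_append, List.mem_singleton]
  split_ifs <;> simp_all <;> decide

theorem pvMask_eq_seven (v : List String) :
    pvMask v = 7 ↔ ("H" ∈ v ∧ "M" ∈ v ∧ "L" ∈ v) := by
  simp only [pvMask]
  by_cases h1 : "H" ∈ v <;> by_cases h2 : "M" ∈ v <;> by_cases h3 : "L" ∈ v <;>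
    norm_num [h1, h2, h3]

theorem pvBit_ne_seven (x : String) : pvBit x ≠ 7 := by
  simp only [pvBit]; split_ifs <;> decide

theorem pvMask_singleton (x : String) : pvMask [x] = pvBit x := by
  simp only [pvMask, pvBit, List.mem_singleton]
  by_cases h1 : x = "H" <;> by_cases h2 : x = "M" <;> by_cases h3 : x = "L" <;>
    simp [h1, h2, h3, eq_comm]

theorem pvBor_zero_bit (x : String) : PySem.Int.bor 0 (pvBit x) = pvBit x := by
  simp only [pvBit]; split_ifs <;> decide

-- countP of a pair list after overwriting the unique entry at key k
theorem pvCountP_overwrite (P : List String → Prop) [DecidablePred P]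
    (l : List (String × List String)) (k : String) (w : List String)
    (hnd : (l.map Prod.fst).Nodup) (hmem : (k, w) ∈ l) (v : List String) :
    ((l.map (fun p => if p.1 == k then (k, v) else p)).countP (fun p => decide (P p.2)) : Int)
      = (l.countP (fun p => decide (P p.2)) : Int)
        + (if P v then 1 else 0) - (if P w then 1 else 0) := by
  induction l with
  | nil => simp at hmem
  | cons p rest ih =>
    simp only [List.map_cons, List.nodup_cons] at hnd
    rcases List.mem_cons.mp hmem with heq | hmem'
    · subst heq
      have hmap : rest.map (fun q => if q.1 == k then ((k, v) : String × List String) else q)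
          = rest := by
        rw [show rest.map (fun q => if q.1 == k then ((k, v) : String × List String) else q)
            = rest.map id from
          List.map_congr_left fun q hq => by
            have hq' : q.1 ∈ rest.map Prod.fst := List.mem_map_of_mem hq
            have hne : q.1 ≠ k := fun h => hnd.1 (h ▸ hq')
            simp [hne]]
        exact List.map_id _
      simp only [List.map_cons, hmap]
      by_cases hv : P v <;> by_cases hw : P w <;> simp [hv, hw]
    · have hk' : k ∈ rest.map Prod.fst := List.mem_map_of_mem hmem'
      have hpk : p.1 ≠ k := fun h => hnd.1 (h ▸ hk')
      have hrec := ih hnd.2 hmem'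
      simp only [List.map_cons]
      rw [show (if p.1 == k then ((k, v) : String × List String) else p) = p from by
        simp [hpk]]
      by_cases hp : P p.2 <;> by_cases hv : P v <;> by_cases hw : P w <;>
        simp [hp, hv, hw] at hrec ⊢ <;> omega

-- the loop invariant of the single-pass program against A's grouping dict
def pvInv (d : PySem.Dict String (List String)) (m : PySem.Dict String Int) (c : Int) : Prop :=
  d.keys = m.keys ∧ d.keys.Nodup ∧ (∀ j, m.getD j 0 = pvMask (d.getD j [])) ∧ c = pvAF d

theorem pvAF_eq_countP (d : PySem.Dict String (List String)) :
    pvAF d = (d.items.countP (fun p => decide ("H" ∈ p.2 ∧ "M" ∈ p.2 ∧ "L" ∈ p.2)) : Int) := by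
  simp only [pvAF, PySem.Dict.values]
  rw [PySem.List.foldl_ite_add_one]
  simp [List.countP_map, Function.comp_def]

theorem pvInv_step (classifications : List String)
    (d : PySem.Dict String (List String)) (m : PySem.Dict String Int) (c : Int) (i : Int)
    (h : pvInv d m c) :
    pvInv (pvStepA classifications d i)
      (pvStepB classifications (m, c) i).1 (pvStepB classifications (m, c) i).2 := by
  obtain ⟨hkeys, hnd, hval, hc⟩ := h
  set k := PySem.List.pyGetD classifications i "" with hk
  set x := PySem.List.pyGetD classifications (i - 1) "" with hx
  have hcont : m.contains k = d.contains k := by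
    rw [PySem.Dict.contains_eq_decide_mem_keys, PySem.Dict.contains_eq_decide_mem_keys, hkeys]
  by_cases hmemk : d.contains k = true
  · -- key already present
    obtain ⟨w, hw⟩ : ∃ w, d.get? k = some w := by
      have hiso := PySem.Dict.contains_eq_isSome_get? (d := d) (k := k)
      rw [hmemk] at hiso
      exact Option.isSome_iff_exists.mp hiso.symm
    have hwD : d.getD k [] = w := PySem.Dict.getD_of_get?_eq_some d [] hw
    have hitems : (k, w) ∈ d.items := PySem.Dict.mem_items_of_get?_eq_some d hw
    have hstepA : pvStepA classifications d i = d.insert k (w ++ [x]) := by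
      simp [pvStepA, hmemk, hwD, ← hk, ← hx]
    have hmk : m.getD k 0 = pvMask w := by rw [hval k, hwD]
    have hnew : PySem.Int.bor (m.getD k 0) (pvBit x) = pvMask (w ++ [x]) := by
      rw [hmk, pvMask_append]
    refine ⟨?_, ?_, ?_, ?_⟩
    · rw [hstepA]
      simp only [pvStepB]
      rw [PySem.Dict.keys_insert_of_contains d _ hmemk,
          PySem.Dict.keys_insert_of_contains m _ (by rw [hcont]; exact hmemk), hkeys]
    · rw [hstepA, PySem.Dict.keys_insert_of_contains d _ hmemk]; exact hnd
    · intro j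
      rw [hstepA]
      simp only [pvStepB]
      rw [PySem.Dict.getD_insert, PySem.Dict.getD_insert]
      by_cases hj : j = k <;> simp only [← hk, ← hx] <;> simp [hj, hnew, hval j]
    · simp only [pvStepB, hstepA, ← hk, ← hx]
      simp only [pvAF_eq_countP] at hc ⊢
      rw [PySem.Dict.items_insert_of_contains d _ hmemk]
      rw [pvCountP_overwrite (fun v => "H" ∈ v ∧ "M" ∈ v ∧ "L" ∈ v) d.items k w (by simpa [PySem.Dict.keys] using hnd) hitems (w ++ [x])]
      rw [hnew, hmk]
      rcases Classical.em ("H" ∈ w ∧ "M" ∈ w ∧ "L" ∈ w) with h2 | h2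
      · -- the list was already complete: the mask was already 7, B does not count again
        have h1 : "H" ∈ w ++ [x] ∧ "M" ∈ w ++ [x] ∧ "L" ∈ w ++ [x] :=
          ⟨List.mem_append_left _ h2.1, List.mem_append_left _ h2.2.1,
            List.mem_append_left _ h2.2.2⟩
        rw [if_neg (by simp [pvMask_eq_seven, h2]), hc, if_pos h1, if_pos h2]
        ring
      · by_cases h1 : ("H" ∈ w ++ [x] ∧ "M" ∈ w ++ [x] ∧ "L" ∈ w ++ [x])
        · -- x completes the set: both programs count this server now
          rw [if_pos ⟨(pvMask_eq_seven _).mpr h1, fun h7 => h2 ((pvMask_eq_seven _).mp h7)⟩,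
              hc, if_pos h1, if_neg h2]
          ring
        · rw [if_neg (by rintro ⟨h7, -⟩; exact h1 ((pvMask_eq_seven _).mp h7)), hc,
              if_neg h1, if_neg h2]
          ring
  · -- fresh key
    have hmemk' : d.contains k = false := by simpa using hmemk
    have hmcont : m.contains k = false := by rw [hcont]; exact hmemk'
    have hmk : m.getD k 0 = 0 := PySem.Dict.getD_of_not_contains m 0 hmcont
    have hstepA : pvStepA classifications d i = d.insert k [x] := by
      simp [pvStepA, hmemk', ← hk, ← hx]
    have hnew : PySem.Int.bor (m.getD k 0) (pvBit x) = pvMask [x] := by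
      rw [hmk, pvBor_zero_bit, pvMask_singleton]
    refine ⟨?_, ?_, ?_, ?_⟩
    · rw [hstepA]
      simp only [pvStepB]
      rw [PySem.Dict.keys_insert_of_not_contains d _ hmemk',
          PySem.Dict.keys_insert_of_not_contains m _ hmcont, hkeys]
    · rw [hstepA]
      exact PySem.Dict.nodup_keys_insert d k [x] hnd
    · intro j
      rw [hstepA]
      simp only [pvStepB]
      rw [PySem.Dict.getD_insert, PySem.Dict.getD_insert]
      by_cases hj : j = k <;> simp only [← hk, ← hx] <;> simp [hj, hnew, hval j]
    · simp only [pvStepB, hstepA, ← hk, ← hx]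
      rw [if_neg (by
        rw [hmk, pvBor_zero_bit]
        rintro ⟨h7, -⟩
        exact pvBit_ne_seven x h7)]
      simp only [pvAF_eq_countP] at hc ⊢
      rw [PySem.Dict.items_insert_of_not_contains d _ hmemk']
      rw [List.countP_append]
      -- a one-element list can never contain all three letters
      simp [List.countP_cons, hc]
      intro h1 h2 h3
      exact absurd (h1.trans h2.symm) (by decide)

theorem pvMain (classifications : List String) (l : List Int)
    (d : PySem.Dict String (List String)) (m : PySem.Dict String Int) (c : Int)
    (h : pvInv d m c) :
    (l.foldl (pvStepB classifications) (m, c)).2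
      = pvAF (l.foldl (pvStepA classifications) d) := by
  induction l generalizing d m c with
  | nil => simpa using h.2.2.2
  | cons i rest ih =>
    simp only [List.foldl_cons]
    have hstep := pvInv_step classifications d m c i h
    exact ih _ _ _ hstep

-- ===== VERDICT (by name: the statement is the Claim_ definition above) =====
theorem count_faulty_servers_spec : Claim_equal_count_faulty_servers := by
  intro classifications _
  unfold Spec_count_faulty_servers count_faulty_servers count_faulty_servers_alt
  exact (pvMain classifications _ PySem.Dict.empty PySem.Dict.empty 0
    ⟨rfl, by simp [PySem.Dict.keys_empty], fun j => by simp [pvMask], rfl⟩).symm
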